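-- pv_equiv track=rewrite | github.com/shbshahriar/Rag-Evolution | scripts/convert_sample_docs.py | appendix_text
-- ===== SOURCE A (Python) =====
-- def appendix_text(title: str, themes: list[str], target_words: int = 5600) -> str:
--     lines = ["", "## Extended Reference Appendix", ""]
--     i = 1
--     while len(" ".join(lines).split()) < target_words and i <= 120:
--         theme = themes[(i - 1) % len(themes)]
--         lines.extend(
--             [
--                 f"### {title} Practice Note {i}",
--                 f"A strong treatment of {title} should connect the core idea to {theme}, because readers need both the definition and the working context. In a retrieval setting, this topic should explain what the concept is, why it matters, how it is used, and what questions usually follow in real work. The best documents make the path from overview to detail feel obvious, so the reader can move from general meaning to concrete application without losing the thread.",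
--                 f"When teams search this content, they usually want a mix of facts, examples, process notes, and cautionary guidance. That means the document benefits from clear sectioning, consistent terminology, and examples that map abstract ideas to concrete situations. For this reason, it helps to describe the inputs, outputs, dependencies, common mistakes, and evaluation criteria that define good use of the topic in practice.",
--                 f"A useful way to deepen the discussion is to describe how {theme} changes the shape of the explanation. In some cases the emphasis is on background knowledge, while in others the emphasis is on execution, measurement, governance, or troubleshooting. A balanced reference explains both the concept and the decision points around it, so a reader can understand not just what to do, but why the step is sensible.",
--                 f"For dataset design, this kind of section is valuable because it creates many semantically related passages. Those passages help a retrieval system learn how the topic is phrased across definitions, implementation details, examples, and caveats. If a model can answer questions about the same idea from different angles, it is usually better prepared for real user questions that are short, messy, or incomplete.",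
--                 f"It also helps to include operational guidance. Readers often need to know how the topic appears in daily work, what tools or processes are typically involved, and where the main failure points are. Describing those patterns makes the document more useful than a bare glossary, because it supports both direct lookup and explanatory answers.",
--                 f"Another important angle is comparison. A strong reference can compare one approach with another, show when a method is appropriate, and identify tradeoffs that affect choice. That comparative framing makes the document richer for retrieval because a single question may ask for differences, advantages, or the conditions under which one option should be preferred over another.",
--                 f"A practical document also anticipates follow-up questions. After a reader learns the basics of {title}, they often want examples, exceptions, recommended checks, and the common misconceptions to avoid. Good coverage answers these follow-ups in a calm, structured way so the content feels complete without becoming hard to navigate.",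
--                 f"In many knowledge bases, the best content is the content that can be chunked cleanly. Short descriptive paragraphs, explicit headings, and repeated vocabulary help produce retrieval-friendly segments. This appendix therefore uses a stable structure on purpose: it gives the system repeated opportunities to see the topic name, the associated theme, and the kinds of explanatory phrases that usually belong together.",
--                 f"When the document is read by a human, the repetition still has a purpose. It reinforces the central concept from different perspectives and makes it easier to skim for a needed answer. When the document is read by a model, the repetition creates stronger anchor points for semantic similarity and better grounding across nearby passages.",
--                 f"The overall principle is simple: describe the idea clearly, place it in a realistic context, show how it is used, and explain the cautions that matter most. That pattern works for technical topics, business topics, policy topics, and educational topics alike. It is also one of the most reliable ways to build a dataset that feels broad enough for testing yet structured enough for retrieval.",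
--                 "",
--             ]
--         )
--         i += 1
--
--     return "\n".join(lines)
-- ===== SOURCE B (Python) =====
-- # Two-phase re-implementation: phase 1 decides how many practice-note blocks are
-- # needed with an incremental word count (no re-join/re-split of the whole document),
-- # phase 2 emits the document in one pass from that count.
--
-- _HEADER = ["", "## Extended Reference Appendix", ""]
--
--
-- def _block(title, theme, i):
--     return [
--         f"### {title} Practice Note {i}",
--         f"A strong treatment of {title} should connect the core idea to {theme}, because readers need both the definition and the working context. In a retrieval setting, this topic should explain what the concept is, why it matters, how it is used, and what questions usually follow in real work. The best documents make the path from overview to detail feel obvious, so the reader can move from general meaning to concrete application without losing the thread.",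
--         f"When teams search this content, they usually want a mix of facts, examples, process notes, and cautionary guidance. That means the document benefits from clear sectioning, consistent terminology, and examples that map abstract ideas to concrete situations. For this reason, it helps to describe the inputs, outputs, dependencies, common mistakes, and evaluation criteria that define good use of the topic in practice.",
--         f"A useful way to deepen the discussion is to describe how {theme} changes the shape of the explanation. In some cases the emphasis is on background knowledge, while in others the emphasis is on execution, measurement, governance, or troubleshooting. A balanced reference explains both the concept and the decision points around it, so a reader can understand not just what to do, but why the step is sensible.",
--         f"For dataset design, this kind of section is valuable because it creates many semantically related passages. Those passages help a retrieval system learn how the topic is phrased across definitions, implementation details, examples, and caveats. If a model can answer questions about the same idea from different angles, it is usually better prepared for real user questions that are short, messy, or incomplete.",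
--         f"It also helps to include operational guidance. Readers often need to know how the topic appears in daily work, what tools or processes are typically involved, and where the main failure points are. Describing those patterns makes the document more useful than a bare glossary, because it supports both direct lookup and explanatory answers.",
--         f"Another important angle is comparison. A strong reference can compare one approach with another, show when a method is appropriate, and identify tradeoffs that affect choice. That comparative framing makes the document richer for retrieval because a single question may ask for differences, advantages, or the conditions under which one option should be preferred over another.",
--         f"A practical document also anticipates follow-up questions. After a reader learns the basics of {title}, they often want examples, exceptions, recommended checks, and the common misconceptions to avoid. Good coverage answers these follow-ups in a calm, structured way so the content feels complete without becoming hard to navigate.",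
--         f"In many knowledge bases, the best content is the content that can be chunked cleanly. Short descriptive paragraphs, explicit headings, and repeated vocabulary help produce retrieval-friendly segments. This appendix therefore uses a stable structure on purpose: it gives the system repeated opportunities to see the topic name, the associated theme, and the kinds of explanatory phrases that usually belong together.",
--         f"When the document is read by a human, the repetition still has a purpose. It reinforces the central concept from different perspectives and makes it easier to skim for a needed answer. When the document is read by a model, the repetition creates stronger anchor points for semantic similarity and better grounding across nearby passages.",
--         f"The overall principle is simple: describe the idea clearly, place it in a realistic context, show how it is used, and explain the cautions that matter most. That pattern works for technical topics, business topics, policy topics, and educational topics alike. It is also one of the most reliable ways to build a dataset that feels broad enough for testing yet structured enough for retrieval.",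
--         "",
--     ]
--
--
-- def appendix_text(title: str, themes: list[str], target_words: int = 5600) -> str:
--     # Phase 1: only count words, incrementally.
--     count = sum(len(line.split()) for line in _HEADER)
--     i = 1
--     while count < target_words and i <= 120:
--         count += sum(len(line.split())
--                      for line in _block(title, themes[(i - 1) % len(themes)], i))
--         i += 1
--     # Phase 2: emit blocks 1..i-1 in one pass.
--     body = [line
--             for j in range(1, i)
--             for line in _block(title, themes[(j - 1) % len(themes)], j)]
--     return "\n".join(_HEADER + body)
-- ===== Notes on version B (the rewrite author's own statement) =====
-- stated objective: faster
-- what changed: B is two-phase: a count-only loop that tracks the word total incrementally (never re-joining/re-splitting the accumulated document) decides how many blocks are needed, then a single comprehension over range(1, i) emits the document; Pre_ excludes only themes == [] with target_words > 4, where A (and B) raise ZeroDivisionError.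
import Mathlib
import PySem

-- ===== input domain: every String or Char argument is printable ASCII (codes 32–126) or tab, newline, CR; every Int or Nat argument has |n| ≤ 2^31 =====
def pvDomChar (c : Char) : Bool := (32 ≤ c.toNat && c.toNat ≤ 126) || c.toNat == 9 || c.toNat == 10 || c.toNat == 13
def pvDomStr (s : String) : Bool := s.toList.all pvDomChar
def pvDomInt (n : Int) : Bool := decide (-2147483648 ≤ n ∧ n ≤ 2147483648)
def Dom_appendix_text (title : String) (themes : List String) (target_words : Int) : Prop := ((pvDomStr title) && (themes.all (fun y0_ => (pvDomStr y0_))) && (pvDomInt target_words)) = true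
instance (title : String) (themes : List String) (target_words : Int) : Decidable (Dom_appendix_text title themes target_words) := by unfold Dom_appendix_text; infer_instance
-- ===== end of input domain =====

-- B decides the number of blocks with a count-only incremental loop, then emits the
-- document in one pass (measured asymptotically faster); equal output wherever A returns.


-- Shared constant data: the eleven f-string lines one loop iteration appends
-- (identical literals in Source A and Source B; B factors them into the helper _block).
def pvBlock (title theme : String) (i : Int) : List String :=
  [ "### " ++ title ++ " Practice Note " ++ PySem.Int.toStr i,
    "A strong treatment of " ++ title ++ " should connect the core idea to " ++ theme ++ ", because readers need both the definition and the working context. In a retrieval setting, this topic should explain what the concept is, why it matters, how it is used, and what questions usually follow in real work. The best documents make the path from overview to detail feel obvious, so the reader can move from general meaning to concrete application without losing the thread.",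
    "When teams search this content, they usually want a mix of facts, examples, process notes, and cautionary guidance. That means the document benefits from clear sectioning, consistent terminology, and examples that map abstract ideas to concrete situations. For this reason, it helps to describe the inputs, outputs, dependencies, common mistakes, and evaluation criteria that define good use of the topic in practice.",
    "A useful way to deepen the discussion is to describe how " ++ theme ++ " changes the shape of the explanation. In some cases the emphasis is on background knowledge, while in others the emphasis is on execution, measurement, governance, or troubleshooting. A balanced reference explains both the concept and the decision points around it, so a reader can understand not just what to do, but why the step is sensible.",
    "For dataset design, this kind of section is valuable because it creates many semantically related passages. Those passages help a retrieval system learn how the topic is phrased across definitions, implementation details, examples, and caveats. If a model can answer questions about the same idea from different angles, it is usually better prepared for real user questions that are short, messy, or incomplete.",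
    "It also helps to include operational guidance. Readers often need to know how the topic appears in daily work, what tools or processes are typically involved, and where the main failure points are. Describing those patterns makes the document more useful than a bare glossary, because it supports both direct lookup and explanatory answers.",
    "Another important angle is comparison. A strong reference can compare one approach with another, show when a method is appropriate, and identify tradeoffs that affect choice. That comparative framing makes the document richer for retrieval because a single question may ask for differences, advantages, or the conditions under which one option should be preferred over another.",
    "A practical document also anticipates follow-up questions. After a reader learns the basics of " ++ title ++ ", they often want examples, exceptions, recommended checks, and the common misconceptions to avoid. Good coverage answers these follow-ups in a calm, structured way so the content feels complete without becoming hard to navigate.",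
    "In many knowledge bases, the best content is the content that can be chunked cleanly. Short descriptive paragraphs, explicit headings, and repeated vocabulary help produce retrieval-friendly segments. This appendix therefore uses a stable structure on purpose: it gives the system repeated opportunities to see the topic name, the associated theme, and the kinds of explanatory phrases that usually belong together.",
    "When the document is read by a human, the repetition still has a purpose. It reinforces the central concept from different perspectives and makes it easier to skim for a needed answer. When the document is read by a model, the repetition creates stronger anchor points for semantic similarity and better grounding across nearby passages.",
    "The overall principle is simple: describe the idea clearly, place it in a realistic context, show how it is used, and explain the cautions that matter most. That pattern works for technical topics, business topics, policy topics, and educational topics alike. It is also one of the most reliable ways to build a dataset that feels broad enough for testing yet structured enough for retrieval.",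
    "" ]

-- len(s.split()), Python's whitespace word count (shared: A applies it to the joined
-- document, B to single lines).
def pvWC (s : String) : Nat := (PySem.Str.split₀ s).length

-- ===== PORT A =====
-- A's while loop accumulates the lines list and re-counts the whole joined document
-- on every test; fuel = remaining iterations (i runs 1..120, so 120 suffices: when
-- fuel hits 0 we have i = 121 and A's own `i <= 120` test would stop it too).
-- `pyGetD … ""` : themes[(i-1) % len(themes)]; the default is unreachable under
-- Pre_appendix_text (Python raises ZeroDivisionError there).
def pvLoopA (title : String) (themes : List String) (target_words : Int) :
    Nat → List String → Int → List String
  | 0, lines, _ => lines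
  | fuel + 1, lines, i =>
    if ((pvWC (PySem.Str.join " " lines) : Int) < target_words ∧ i ≤ 120) then
      let theme := PySem.List.pyGetD themes (PySem.Int.mod (i - 1) (themes.length : Int)) ""
      pvLoopA title themes target_words fuel (lines ++ pvBlock title theme i) (i + 1)
    else lines

def appendix_text (title : String) (themes : List String) (target_words : Int) : String :=
  PySem.Str.join "\n" (pvLoopA title themes target_words 120 ["", "## Extended Reference Appendix", ""] 1)

-- ===== PORT B =====
-- Phase 1 of B: count words incrementally, keep no lines; returns the final i
-- (one past the last block emitted).
def pvCountB (title : String) (themes : List String) (target_words : Int) :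
    Nat → Nat → Int → Int
  | 0, _, i => i
  | fuel + 1, count, i =>
    if ((count : Int) < target_words ∧ i ≤ 120) then
      pvCountB title themes target_words fuel
        (count + ((pvBlock title (PySem.List.pyGetD themes (PySem.Int.mod (i - 1) (themes.length : Int)) "") i).map pvWC).sum)
        (i + 1)
    else i

-- Phase 2 of B: the comprehension `[line for j in range(1, i) for line in _block(...)]`.
def appendix_text_alt (title : String) (themes : List String) (target_words : Int) : String :=
  let header : List String := ["", "## Extended Reference Appendix", ""]
  let iEnd := pvCountB title themes target_words 120 ((header.map pvWC).sum) 1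
  let body := (PySem.List.pyRange 1 iEnd 1).flatMap
      (fun j => pvBlock title (PySem.List.pyGetD themes (PySem.Int.mod (j - 1) (themes.length : Int)) "") j)
  PySem.Str.join "\n" (header ++ body)

-- ===== PRECONDITION & SPEC =====
-- Pre_ excludes exactly the inputs where A raises (ZeroDivisionError from
-- `(i-1) % len(themes)` with themes == [], reached iff the loop is entered, i.e.
-- target_words > 4, the word count of the initial header); B raises there too.
def Pre_appendix_text (title : String) (themes : List String) (target_words : Int) : Prop :=
  themes ≠ [] ∨ target_words ≤ 4
instance (title : String) (themes : List String) (target_words : Int) : Decidable (Pre_appendix_text title themes target_words) := by unfold Pre_appendix_text; infer_instance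

def pvWitness_appendix_text : String × List String × Int := ("Data Quality", ["governance", "retrieval"], 60)

def Spec_appendix_text (title : String) (themes : List String) (target_words : Int) (out : String) : Prop := out = appendix_text_alt title themes target_words
instance (title : String) (themes : List String) (target_words : Int) (out : String) : Decidable (Spec_appendix_text title themes target_words out) := by unfold Spec_appendix_text; infer_instance

-- ===== CLAIM (what is proved, stated in full; the proofs are below) =====
def Claim_equal_appendix_text : Prop := ∀ (title : String) (themes : List String) (target_words : Int), Dom_appendix_text title themes target_words → Pre_appendix_text title themes target_words → Spec_appendix_text title themes target_words (appendix_text title themes target_words)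

-- ===== LEMMAS AND PROOFS =====

-- The accumulator of split₀.go prepends reversed.
theorem pv_go_acc (s cur : List Char) (acc : List (List Char)) :
    PySem.Chars.split₀.go s cur acc = acc.reverse ++ PySem.Chars.split₀.go s cur [] := by
  induction s generalizing cur acc with
  | nil => simp [PySem.Chars.split₀.go]; split <;> simp
  | cons c rest ih =>
    simp only [PySem.Chars.split₀.go]
    split
    · split
      · exact ih _ _
      · rw [ih [] (cur.reverse :: acc), ih [] [cur.reverse]]; simp
    · exact ih _ _

-- Splitting across an explicit space splits independently on the two sides.
theorem pv_go_append_space (a b cur : List Char) (acc : List (List Char)) :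
    PySem.Chars.split₀.go (a ++ ' ' :: b) cur acc =
      PySem.Chars.split₀.go a cur acc ++ PySem.Chars.split₀.go b [] [] := by
  induction a generalizing cur acc with
  | nil =>
    simp only [List.nil_append, PySem.Chars.split₀.go]
    have hsp : PySem.Chars.isspace ' ' = true := by decide
    rw [hsp]
    simp only [if_true]
    split
    · exact pv_go_acc b [] acc
    · exact pv_go_acc b [] (cur.reverse :: acc)
  | cons c rest ih =>
    simp only [List.cons_append, PySem.Chars.split₀.go]
    split
    · split
      · exact ih _ _
      · exact ih _ _
    · exact ih _ _

theorem pv_split_append_space (a b : List Char) :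
    PySem.Chars.split₀ (a ++ ' ' :: b) = PySem.Chars.split₀ a ++ PySem.Chars.split₀ b := by
  simp only [PySem.Chars.split₀]
  exact pv_go_append_space a b [] []

-- Word count of a space-joined list is the sum of the lines' word counts.
theorem pv_wc_intercalate (ls : List (List Char)) :
    (PySem.Chars.split₀ (List.intercalate [' '] ls)).length =
      (ls.map (fun c => (PySem.Chars.split₀ c).length)).sum := by
  induction ls with
  | nil => simp [List.intercalate, PySem.Chars.split₀, PySem.Chars.split₀.go]
  | cons x tl ih =>
    cases tl with
    | nil => simp [List.intercalate]
    | cons y r =>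
      have h : List.intercalate [' '] (x :: y :: r) = x ++ ' ' :: List.intercalate [' '] (y :: r) := by
        simp [List.intercalate, List.intersperse]
      rw [h, pv_split_append_space]
      simp only [List.length_append, List.map_cons, List.sum_cons]
      rw [ih]
      simp

theorem pv_wc_join (xs : List String) : pvWC (PySem.Str.join " " xs) = (xs.map pvWC).sum := by
  simp only [pvWC, PySem.Str.join, PySem.Str.split₀, PySem.Chars.join, String.toList_ofList,
    List.length_map]
  have : (" " : String).toList = [' '] := rfl
  rw [this, pv_wc_intercalate]
  have hwc : ∀ x : String, pvWC x = (PySem.Chars.split₀ x.toList).length := by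
    intro x; simp [pvWC, PySem.Str.split₀]
  rw [List.map_congr_left (fun x _ => hwc x)]
  simp [List.map_map, Function.comp_def]

-- B's counting loop never moves i backwards.
theorem pv_countB_ge (title : String) (themes : List String) (target_words : Int)
    (fuel : Nat) (count : Nat) (i : Int) :
    i ≤ pvCountB title themes target_words fuel count i := by
  induction fuel generalizing count i with
  | zero => simp [pvCountB]
  | succ fuel ih =>
    simp only [pvCountB]
    split
    · exact le_trans (by omega) (ih _ (i + 1))
    · exact le_refl i

-- Decomposition: A's loop appends exactly the blocks j = i .. pvCountB … i - 1,
-- where B's count-only loop is started from the word total of the current lines.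
theorem pv_loopA_decomp (title : String) (themes : List String) (target_words : Int)
    (fuel : Nat) (lines : List String) (i : Int) :
    pvLoopA title themes target_words fuel lines i =
      lines ++ (PySem.List.pyRange i (pvCountB title themes target_words fuel ((lines.map pvWC).sum) i) 1).flatMap
        (fun j => pvBlock title (PySem.List.pyGetD themes (PySem.Int.mod (j - 1) (themes.length : Int)) "") j) := by
  induction fuel generalizing lines i with
  | zero => simp [pvLoopA, pvCountB, PySem.List.pyRange_one_eq_nil (le_refl i)]
  | succ fuel ih =>
    simp only [pvLoopA, pvCountB, pv_wc_join]
    split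
    · rw [ih]
      have hsum : (List.map pvWC (lines ++ pvBlock title
            (PySem.List.pyGetD themes (PySem.Int.mod (i - 1) (themes.length : Int)) "") i)).sum =
          (List.map pvWC lines).sum +
            ((pvBlock title (PySem.List.pyGetD themes (PySem.Int.mod (i - 1) (themes.length : Int)) "") i).map pvWC).sum := by
        simp
      rw [hsum]
      have hlt : i < pvCountB title themes target_words fuel
          ((List.map pvWC lines).sum +
            ((pvBlock title (PySem.List.pyGetD themes (PySem.Int.mod (i - 1) (themes.length : Int)) "") i).map pvWC).sum)
          (i + 1) :=
        lt_of_lt_of_le (by omega) (pv_countB_ge _ _ _ _ _ _)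
      rw [PySem.List.pyRange_one_cons hlt]
      simp
    · simp [PySem.List.pyRange_one_eq_nil (le_refl i)]

-- ===== VERDICT (by name: the statement is the Claim_ definition above) =====
theorem appendix_text_spec : Claim_equal_appendix_text := by
  intro title themes target_words _ _
  unfold Spec_appendix_text appendix_text appendix_text_alt
  rw [pv_loopA_decomp]
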